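-- pv_equiv track=rewrite | github.com/DongDong-123/codewars | LongestChildList.py | longestchildlist
-- ===== SOURCE A (Python) =====
-- def longestchildlist(arr):
--     arr2 = arr[::-1]
--     res = []
--     for i in range(1, len(arr)):
--         b = []
--         for v in arr2[i-1:]:
--             if len(b):
--                 if v < b[0]:
--                     b.insert(0, v)
--             else:
--                 b.insert(0, v)
--
--         if len(b) > len(res):
--             res = b
--
--     return res
-- ===== SOURCE B (Python) =====
-- def longestchildlist(arr):
--     # One left-to-right pass with a monotonic stack: after reading a prefix of
--     # arr, `stack` is exactly the greedy strictly-decreasing minima chain of the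
--     # reversed prefix, stored in increasing order (the value A's inner loop
--     # builds for that suffix of arr[::-1]).  Amortized O(n) instead of O(n^2).
--     stack = []
--     best = []
--     first = True
--     for v in arr:
--         while stack and stack[-1] >= v:
--             stack.pop()
--         stack.append(v)
--         if not first and len(best) <= len(stack):
--             best = stack.copy()
--         first = False
--     return best
-- ===== Notes on version B (the rewrite author's own statement) =====
-- stated objective: faster
-- what changed: Replaced the O(n^2) scan that rebuilds a greedy strictly-decreasing minima chain for every suffix of the reversed array by a single left-to-right monotonic-stack pass that maintains the chain of the current reversed prefix incrementally and tracks the best candidate.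
import Mathlib
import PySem

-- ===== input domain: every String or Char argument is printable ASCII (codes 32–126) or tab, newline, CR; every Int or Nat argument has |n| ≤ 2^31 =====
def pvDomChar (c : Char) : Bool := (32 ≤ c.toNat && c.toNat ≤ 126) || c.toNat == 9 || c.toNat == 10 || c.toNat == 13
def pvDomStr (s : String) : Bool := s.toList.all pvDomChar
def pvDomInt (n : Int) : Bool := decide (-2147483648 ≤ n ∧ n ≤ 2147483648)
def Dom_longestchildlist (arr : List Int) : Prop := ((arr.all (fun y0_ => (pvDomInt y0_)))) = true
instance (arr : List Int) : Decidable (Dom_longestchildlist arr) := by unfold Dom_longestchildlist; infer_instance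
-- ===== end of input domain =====

-- B replaces A's O(n^2) per-suffix rebuild of the greedy minima chain by one
-- monotonic-stack pass that maintains the chain incrementally (objective: faster).

-- ===== PORT A =====
-- inner loop body: b.insert(0, v) guarded as in A
def aStep (b : List Int) (v : Int) : List Int :=
  match b with
  | [] => v :: b
  | h :: _ => if v < h then v :: b else b

def longestchildlist (arr : List Int) : List Int :=
  let arr2 := (PySem.List.slice? arr none none (-1)).getD []   -- arr[::-1]
  (PySem.List.pyRange 1 (arr.length : Int) 1).foldl
    (fun res i =>
      let b := (PySem.List.slice arr2 (some (i - 1)) none).foldl aStep []   -- arr2[i-1:]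
      if res.length < b.length then b else res) []

-- ===== PORT B =====
-- state: ((stack, best), not_first); python's stack/best are stored reversed
-- (head of the Lean list = python's stack[-1]), so pop-from-end = dropWhile at the head
def bStep (acc : (List Int × List Int) × Bool) (v : Int) : (List Int × List Int) × Bool :=
  let s := v :: acc.1.1.dropWhile (fun x => decide (v ≤ x))
  ((s, if acc.2 && decide (acc.1.2.length ≤ s.length) then s else acc.1.2), true)

def longestchildlist_alt (arr : List Int) : List Int :=
  ((arr.foldl bStep (([], []), false)).1.2).reverse

-- ===== PRECONDITION & SPEC =====
def Spec_longestchildlist (arr : List Int) (out : List Int) : Prop := out = longestchildlist_alt arr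
instance (arr : List Int) (out : List Int) : Decidable (Spec_longestchildlist arr out) := by unfold Spec_longestchildlist; infer_instance

-- ===== CLAIM (what is proved, stated in full; the proofs are below) =====
def Claim_equal_longestchildlist : Prop := ∀ (arr : List Int), Dom_longestchildlist arr → Spec_longestchildlist arr (longestchildlist arr)

-- ===== LEMMAS AND PROOFS =====

-- greedy strictly-decreasing minima chain after a forced first element m
def gr (m : Int) : List Int → List Int
  | [] => []
  | v :: t => if v < m then v :: gr v t else gr m t

-- the chain A's inner loop computes (in take order) for a given suffix
def chain : List Int → List Int
  | [] => []
  | v :: t => v :: gr v t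

-- first element of maximal length (the value both "keep the longer" folds compute)
def amf : List (List Int) → List Int
  | [] => []
  | c :: l => if c.length < (amf l).length then amf l else c

-- successive stks produced by B from stack s over the remaining input
def stks (s : List Int) : List Int → List (List Int)
  | [] => []
  | v :: t =>
      let s' := v :: s.dropWhile (fun x => decide (v ≤ x))
      s' :: stks s' t

theorem gr_mem_lt (t : List Int) (m x : Int) (hx : x ∈ gr m t) : x < m := by
  induction t generalizing m with
  | nil => simp [gr] at hx
  | cons v t ih =>
    simp only [gr] at hx
    split at hx
    · rcases List.mem_cons.1 hx with h | h
      · omega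
      · have := ih _ h; omega
    · exact ih _ hx

theorem gr_filter_of_le (t : List Int) (m M : Int) (h : m ≤ M) :
    gr m t = (gr M t).filter (fun x => decide (x < m)) := by
  induction t generalizing m M with
  | nil => simp [gr]
  | cons v t ih =>
    by_cases h1 : v < m
    · have h2 : v < M := by omega
      simp only [gr, if_pos h1, if_pos h2, List.filter_cons, decide_eq_true_eq, h1, if_pos]
      congr 1
      exact (List.filter_eq_self.2 (fun x hx => by
        have := gr_mem_lt t v x hx; simp; omega)).symm
    · by_cases h2 : v < M
      · simp only [gr, if_neg h1, if_pos h2, List.filter_cons, decide_eq_true_eq, h1, if_neg,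
          if_false]
        exact ih m v (by omega)
      · simp only [gr, if_neg h1, if_neg h2]
        exact ih m M h

theorem gr_eq_filter_chain (t : List Int) (v : Int) :
    gr v t = (chain t).filter (fun x => decide (x < v)) := by
  cases t with
  | nil => simp [gr, chain]
  | cons w ys =>
    by_cases h : w < v
    · simp only [gr, chain, if_pos h, List.filter_cons, decide_eq_true_eq, h, if_pos]
      congr 1
      exact (List.filter_eq_self.2 (fun x hx => by
        have := gr_mem_lt ys w x hx; simp; omega)).symm
    · simp only [gr, chain, if_neg h, List.filter_cons, decide_eq_true_eq, h, if_neg, if_false]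
      exact gr_filter_of_le ys v w (by omega)

theorem gr_pairwise (t : List Int) (m : Int) : (gr m t).Pairwise (fun a b => b < a) := by
  induction t generalizing m with
  | nil => simp [gr]
  | cons v t ih =>
    by_cases h : v < m
    · simp only [gr, if_pos h]
      exact List.pairwise_cons.2 ⟨fun x hx => gr_mem_lt t v x hx, ih v⟩
    · simpa only [gr, if_neg h] using ih m

theorem chain_pairwise (t : List Int) : (chain t).Pairwise (fun a b => b < a) := by
  cases t with
  | nil => simp [chain]
  | cons v t =>
    exact List.pairwise_cons.2 ⟨fun x hx => gr_mem_lt t v x hx, gr_pairwise t v⟩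

theorem dropWhile_eq_filter_of_sorted (s : List Int) (v : Int)
    (h : s.Pairwise (fun a b => b < a)) :
    s.dropWhile (fun x => decide (v ≤ x)) = s.filter (fun x => decide (x < v)) := by
  induction s with
  | nil => simp
  | cons hd t ih =>
    have ht := (List.pairwise_cons.1 h).1
    have htp := (List.pairwise_cons.1 h).2
    by_cases hv : v ≤ hd
    · rw [List.dropWhile_cons_of_pos (by simpa using hv),
        List.filter_cons_of_neg (by simp; omega)]
      exact ih htp
    · rw [List.dropWhile_cons_of_neg (by simpa using hv),
        List.filter_cons_of_pos (by simp; omega)]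
      congr 1
      exact (List.filter_eq_self.2 (fun x hx => by
        have := ht x hx; simp; omega)).symm

theorem chain_cons (v : Int) (t : List Int) :
    chain (v :: t) = v :: (chain t).dropWhile (fun x => decide (v ≤ x)) := by
  show v :: gr v t = _
  congr 1
  rw [dropWhile_eq_filter_of_sorted (chain t) v (chain_pairwise t)]
  exact gr_eq_filter_chain t v

theorem foldl_aStep (t : List Int) (m : Int) (tl : List Int) :
    t.foldl aStep (m :: tl) = (gr m t).reverse ++ m :: tl := by
  induction t generalizing m tl with
  | nil => simp [gr]
  | cons v t ih =>
    by_cases h : v < m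
    · simp only [List.foldl_cons, aStep, if_pos h, gr, ih v (m :: tl), List.reverse_cons,
        List.append_assoc, List.cons_append, List.nil_append]
    · simp only [List.foldl_cons, aStep, if_neg h, gr, ih m tl]

theorem foldl_aStep_nil (t : List Int) : t.foldl aStep [] = (chain t).reverse := by
  cases t with
  | nil => rfl
  | cons v t =>
    show t.foldl aStep [v] = _
    rw [foldl_aStep t v []]
    simp [chain]

theorem foldl_gt_eq (l : List (List Int)) (r : List Int) :
    l.foldl (fun res c => if res.length < c.length then c else res) r
      = if r.length < (amf l).length then amf l else r := by
  induction l generalizing r with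
  | nil => simp [amf]
  | cons c l ih =>
    simp only [List.foldl_cons, amf, ih]
    split_ifs <;> first | rfl | omega

theorem foldl_gt_nil (l : List (List Int)) :
    l.foldl (fun res c => if res.length < c.length then c else res) [] = amf l := by
  rw [foldl_gt_eq]
  cases h : amf l with
  | nil => simp
  | cons a t => simp

theorem foldr_ge_nil (l : List (List Int)) :
    l.foldr (fun c res => if res.length ≤ c.length then c else res) [] = amf l := by
  induction l with
  | nil => rfl
  | cons c l ih =>
    simp only [List.foldr_cons, amf, ih]
    split_ifs <;> first | rfl | omega

theorem foldl_ge_nil (l : List (List Int)) :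
    l.foldl (fun res c => if res.length ≤ c.length then c else res) [] = amf l.reverse := by
  conv_lhs => rw [← List.reverse_reverse l]
  rw [List.foldl_reverse]
  exact foldr_ge_nil l.reverse

theorem amf_map_reverse (l : List (List Int)) :
    amf (l.map List.reverse) = (amf l).reverse := by
  induction l with
  | nil => rfl
  | cons c l ih =>
    simp only [List.map_cons, amf, ih, List.length_reverse]
    split_ifs <;> rfl

theorem foldl_bStep (t : List Int) (s best : List Int) :
    ((t.foldl bStep ((s, best), true)).1.2)
      = (stks s t).foldl (fun res c => if res.length ≤ c.length then c else res) best := by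
  induction t generalizing s best with
  | nil => rfl
  | cons v t ih =>
    simp only [List.foldl_cons, bStep, Bool.true_and, stks]
    rw [ih]
    simp only [List.length_cons, decide_eq_true_eq]
    congr 1

theorem stks_chain (t rp : List Int) :
    stks (chain rp) t
      = (List.range t.length).map (fun m => chain ((t.take (m + 1)).reverse ++ rp)) := by
  induction t generalizing rp with
  | nil => simp [stks]
  | cons v t ih =>
    simp only [stks]
    rw [← chain_cons v rp, ih (v :: rp), List.length_cons, List.range_succ_eq_map, List.map_cons, List.map_map]
    congr 1
    simp

theorem a_side (v0 : Int) (rest : List Int) :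
    longestchildlist (v0 :: rest)
      = (amf ((List.range rest.length).map
          (fun k => chain (((v0 :: rest).reverse).drop k)))).reverse := by
  rw [← amf_map_reverse, List.map_map, ← foldl_gt_nil]
  simp only [longestchildlist, PySem.List.slice?_none_none_neg_one, Option.getD_some,
    List.length_cons, Nat.cast_add, Nat.cast_one]
  rw [PySem.List.pyRange_one,
    show ((rest.length : Int) + 1 - 1) = (rest.length : Int) by ring,
    Int.toNat_natCast, List.foldl_map, List.foldl_map]
  congr 1
  funext res k
  rw [show (1 : Int) + (k : Int) - 1 = (k : Int) by ring]
  rw [PySem.List.slice_from_natCast, foldl_aStep_nil]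
  simp [Function.comp]

theorem b_side (v0 : Int) (rest : List Int) :
    longestchildlist_alt (v0 :: rest)
      = (amf (((List.range rest.length).map
          (fun m => chain ((rest.take (m + 1)).reverse ++ [v0]))).reverse)).reverse := by
  simp only [longestchildlist_alt, List.foldl_cons]
  rw [show bStep (([], []), false) v0 = ((chain [v0], []), true) from rfl]
  rw [foldl_bStep, stks_chain, foldl_ge_nil]

theorem bridge (v0 : Int) (rest : List Int) :
    (List.range rest.length).map (fun k => chain (((v0 :: rest).reverse).drop k))
      = ((List.range rest.length).map
          (fun m => chain ((rest.take (m + 1)).reverse ++ [v0]))).reverse := by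
  apply List.ext_getElem
  · simp
  · intro k h1 h2
    simp only [List.length_map, List.length_range] at h1
    rw [List.getElem_reverse, List.getElem_map, List.getElem_map, List.getElem_range,
      List.getElem_range]
    congr 1
    rw [List.reverse_cons, List.drop_append_of_le_length (by simp; omega), List.drop_reverse]
    simp only [List.length_map, List.length_range]
    rw [show rest.length - 1 - k + 1 = rest.length - k by omega]

-- ===== VERDICT (by name: the statement is the Claim_ definition above) =====
theorem longestchildlist_spec : Claim_equal_longestchildlist := by
  intro arr _
  unfold Spec_longestchildlist
  cases arr with
  | nil => rfl
  | cons v0 rest => rw [a_side, b_side, bridge]
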